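-- pv_equiv track=rewrite | github.com/utshar008/Data-Communication | unipolar.py | differential_manchester
-- ===== SOURCE A (Python) =====
-- def differential_manchester(data):
--     lv=1
--     encoded_data = []
--
--
--     for bit in data:
--         if bit == '0':
--
--             encoded_data.extend([- lv, lv])
--
--         else:
--
--             encoded_data.extend([lv,-lv])
--             lv=-lv
--
--     return encoded_data
-- ===== SOURCE B (Python) =====
-- def differential_manchester(data):
--     # Pass 1: level in effect before each bit = (-1)^(number of preceding non-'0' bits)
--     levels = []
--     cnt = 0
--     for bit in data:
--         levels.append(1 if cnt % 2 == 0 else -1)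
--         cnt += (bit != '0')
--     # Pass 2: stateless emission
--     return [v for bit, l in zip(data, levels)
--             for v in ((-l, l) if bit == '0' else (l, -l))]
-- ===== Notes on version B (the rewrite author's own statement) =====
-- stated objective: alternative
-- what changed: Replaces the single mutable running-level loop by two passes: first a cumulative parity count builds a table of the pre-flip level at each position, then a stateless comprehension over zip(data, levels) emits the two half-bit values.
import Mathlib
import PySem

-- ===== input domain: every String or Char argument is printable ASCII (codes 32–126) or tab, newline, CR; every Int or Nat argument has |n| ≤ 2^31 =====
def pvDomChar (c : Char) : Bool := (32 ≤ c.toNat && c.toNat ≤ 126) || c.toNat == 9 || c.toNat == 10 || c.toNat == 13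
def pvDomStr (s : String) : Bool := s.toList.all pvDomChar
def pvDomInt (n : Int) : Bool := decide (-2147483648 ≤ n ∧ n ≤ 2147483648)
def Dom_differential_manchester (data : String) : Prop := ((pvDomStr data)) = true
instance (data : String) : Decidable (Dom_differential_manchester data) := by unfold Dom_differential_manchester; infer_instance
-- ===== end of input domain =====

-- B replaces A's single mutable running-level loop by a precomputed level table (cumulative
-- parity pass) followed by a stateless emission pass; objective: alternative decomposition.

-- ===== PORT A =====
-- the for-loop over data with state (lv, encoded_data)
def dmLoopA : List Char → Int → List Int → List Int
  | [], _, acc => acc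
  | b :: t, lv, acc =>
      if b = '0' then dmLoopA t lv (acc ++ [-lv, lv])
      else dmLoopA t (-lv) (acc ++ [lv, -lv])

def differential_manchester (data : String) : List Int :=
  dmLoopA data.toList 1 []

-- ===== PORT B =====
-- pass 1: loop appending to `levels` while counting non-'0' bits (state (cnt, levels))
def dmLevels (l : List Char) : List Int :=
  (l.foldl (fun (s : Int × List Int) b =>
      (s.1 + (if b ≠ '0' then 1 else 0),
       s.2 ++ [if s.1 % 2 = 0 then (1 : Int) else -1])) (0, [])).2

-- pass 2: stateless flattening comprehension over zip(data, levels)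
def differential_manchester_alt (data : String) : List Int :=
  (data.toList.zip (dmLevels data.toList)).flatMap
    (fun p => if p.1 = '0' then [-p.2, p.2] else [p.2, -p.2])

-- ===== PRECONDITION & SPEC =====
def Spec_differential_manchester (data : String) (out : List Int) : Prop := out = differential_manchester_alt data
instance (data : String) (out : List Int) : Decidable (Spec_differential_manchester data out) := by unfold Spec_differential_manchester; infer_instance

-- ===== CLAIM (what is proved, stated in full; the proofs are below) =====
def Claim_equal_differential_manchester : Prop := ∀ (data : String), Dom_differential_manchester data → Spec_differential_manchester data (differential_manchester data)

-- ===== LEMMAS AND PROOFS =====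

-- simple recursive form of the level table
def dmLevelsRec : List Char → Int → List Int
  | [], _ => []
  | b :: t, c => (if c % 2 = 0 then (1 : Int) else -1) ::
      dmLevelsRec t (c + (if b ≠ '0' then 1 else 0))

theorem dmLevels_foldl (l : List Char) (c : Int) (acc : List Int) :
    (l.foldl (fun (s : Int × List Int) b =>
        (s.1 + (if b ≠ '0' then 1 else 0),
         s.2 ++ [if s.1 % 2 = 0 then (1 : Int) else -1])) (c, acc)).2
      = acc ++ dmLevelsRec l c := by
  induction l generalizing c acc with
  | nil => simp [dmLevelsRec]
  | cons b t ih =>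
    simp only [List.foldl_cons]
    rw [ih]
    simp only [dmLevelsRec, List.append_assoc, List.singleton_append]

theorem dmLvSucc (c : Int) :
    (-(if c % 2 = 0 then (1 : Int) else -1)) = (if (c + 1) % 2 = 0 then 1 else -1) := by
  have h2 : (c + 1) % 2 = 0 ↔ ¬ c % 2 = 0 := by omega
  by_cases h : c % 2 = 0 <;> simp [h, h2]

theorem dmLoopA_eq (l : List Char) (c : Int) (acc : List Int) :
    dmLoopA l (if c % 2 = 0 then 1 else -1) acc
      = acc ++ (l.zip (dmLevelsRec l c)).flatMap
          (fun p => if p.1 = '0' then [-p.2, p.2] else [p.2, -p.2]) := by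
  induction l generalizing c acc with
  | nil => simp [dmLoopA]
  | cons b t ih =>
    by_cases hb : b = '0'
    · simp only [dmLoopA, dmLevelsRec, hb, List.zip_cons_cons,
        List.flatMap_cons, ite_true, ne_eq, not_true_eq_false, if_false, add_zero]
      rw [ih c, List.append_assoc]
    · simp only [dmLoopA, dmLevelsRec, hb, List.zip_cons_cons,
        List.flatMap_cons, ne_eq, not_false_eq_true, if_true]
      rw [dmLvSucc c, ih (c + 1), List.append_assoc]
      simp

theorem differential_manchester_spec : Claim_equal_differential_manchester := by
  intro data _
  unfold Spec_differential_manchester differential_manchester differential_manchester_alt dmLevels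
  rw [dmLevels_foldl, List.nil_append]
  have := dmLoopA_eq data.toList 0 []
  simpa using this
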